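-- pv_equiv track=rewrite | github.com/sriram-chinthala/foundry_dash | core/logic/universe_helpers.py | apply_universe_changes
-- ===== SOURCE A (Python) =====
-- import copy # Required for deepcopy
-- from typing import Dict, List, Set, Tuple
--
-- def apply_universe_changes(
--     current_universes: Dict[str, List[str]],
--     selected_universe: str,
--     stocks_to_add: List[str],
--     stocks_to_remove: List[str],
--     manual_stocks_text: str
-- ) -> Dict[str, List[str]]:
--     """Applies additions and removals to the selected universe and returns the updated dict."""
--
--     if not selected_universe or selected_universe not in current_universes:
--         return current_universes
--
--     # CRITICAL FIX: Use deepcopy to prevent state mutation in other universes (Bug 2)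
--     new_universes = copy.deepcopy(current_universes)
--
--     # Work on a set for efficient manipulation
--     current_stocks = set(new_universes.get(selected_universe, []))
--
--     # 1. Additions from Checkboxes
--     current_stocks.update(set(s for s in stocks_to_add if s))
--
--     # 2. Additions from Manual Entry
--     if manual_stocks_text:
--         manual_additions = {s.strip().upper() for s in manual_stocks_text.splitlines() if s.strip()}
--         current_stocks.update(manual_additions)
--
--     # 3. Removals
--     stocks_to_remove_set = set(s for s in stocks_to_remove if s)
--     current_stocks.difference_update(stocks_to_remove_set)
--
--     # Update the specific universe list
--     new_universes[selected_universe] = sorted(list(current_stocks))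
--
--     return new_universes
-- ===== SOURCE B (Python) =====
-- def apply_universe_changes(
--     current_universes,
--     selected_universe,
--     stocks_to_add,
--     stocks_to_remove,
--     manual_stocks_text,
-- ):
--     """Sort-merge rebuild: sort the candidate multiset and the removal list, then one
--     linear sweep deduplicates adjacent equals and skips removals with a two-pointer
--     merge (no sets, no deepcopy; only the selected universe's entry is rebuilt)."""
--     if not selected_universe or selected_universe not in current_universes:
--         return current_universes
--
--     candidates = sorted(
--         current_universes[selected_universe]
--         + [s for s in stocks_to_add if s]
--         + [s.strip().upper() for s in manual_stocks_text.splitlines() if s.strip()]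
--     )
--     removals = sorted(s for s in stocks_to_remove if s)
--
--     new_list = []
--     i = 0
--     prev = None
--     for c in candidates:
--         if prev is not None and c == prev:
--             continue
--         prev = c
--         while i < len(removals) and removals[i] < c:
--             i += 1
--         if i < len(removals) and removals[i] == c:
--             continue
--         new_list.append(c)
--
--     return {k: (new_list if k == selected_universe else v)
--             for k, v in current_universes.items()}
-- ===== Notes on version B (the rewrite author's own statement) =====
-- stated objective: alternative
-- what changed: Replaces A's deepcopy-everything + hash-set union/difference + final sort by a sort-merge algorithm: sort the raw candidate multiset and the removal list up front, then one linear sweep that skips adjacent duplicates and advances a second pointer through the sorted removals; only the selected universe's entry is rebuilt, the other lists are shared, not copied.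
import Mathlib
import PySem

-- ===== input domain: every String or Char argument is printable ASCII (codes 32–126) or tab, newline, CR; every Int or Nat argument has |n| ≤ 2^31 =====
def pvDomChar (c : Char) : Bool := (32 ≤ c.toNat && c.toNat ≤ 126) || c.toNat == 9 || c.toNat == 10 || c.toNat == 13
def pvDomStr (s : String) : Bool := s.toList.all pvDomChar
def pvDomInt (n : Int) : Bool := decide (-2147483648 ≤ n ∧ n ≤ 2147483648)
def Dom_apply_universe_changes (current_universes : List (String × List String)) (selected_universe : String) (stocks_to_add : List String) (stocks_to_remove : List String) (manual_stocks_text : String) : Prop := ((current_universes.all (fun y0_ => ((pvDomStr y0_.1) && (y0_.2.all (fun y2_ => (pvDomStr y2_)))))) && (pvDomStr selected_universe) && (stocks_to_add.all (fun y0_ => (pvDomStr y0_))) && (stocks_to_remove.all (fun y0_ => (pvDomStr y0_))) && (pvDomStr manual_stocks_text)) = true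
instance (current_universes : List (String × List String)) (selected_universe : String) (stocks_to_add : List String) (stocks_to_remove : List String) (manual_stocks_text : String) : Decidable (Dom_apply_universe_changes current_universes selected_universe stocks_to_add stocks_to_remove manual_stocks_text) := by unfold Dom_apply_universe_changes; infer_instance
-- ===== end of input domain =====

-- B replaces A's deepcopy + hash-set arithmetic by a sort-merge sweep (sorted candidates deduped adjacently, removals skipped by a second pointer), rebuilding only the selected universe's entry; return values proved equal.


-- ===== PORT A =====
-- `[s.strip().upper() for s in manual_stocks_text.splitlines() if s.strip()]` (deduped by Set.ofList at A's use site)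
def pvManualLines (manual_stocks_text : String) : List String :=
  ((PySem.Str.splitlines manual_stocks_text).filter (fun s => PySem.Str.strip s ≠ "")).map
    (fun s => PySem.Str.upper (PySem.Str.strip s))

def apply_universe_changes (current_universes : List (String × List String)) (selected_universe : String) (stocks_to_add : List String) (stocks_to_remove : List String) (manual_stocks_text : String) : List (String × List String) :=
  if selected_universe = "" ∨ ¬ (PySem.Dict.mk current_universes).contains selected_universe then
    current_universes
  else
    -- deepcopy of immutable data is the same value
    let new_universes : PySem.Dict String (List String) := PySem.Dict.mk current_universes
    let current_stocks : PySem.Set String := PySem.Set.ofList (new_universes.getD selected_universe [])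
    -- 1. additions from checkboxes
    let current_stocks := PySem.Set.update current_stocks (PySem.Set.ofList (stocks_to_add.filter (fun s => s ≠ "")))
    -- 2. additions from manual entry
    let current_stocks :=
      if manual_stocks_text ≠ "" then
        PySem.Set.update current_stocks (PySem.Set.ofList (pvManualLines manual_stocks_text))
      else current_stocks
    -- 3. removals
    let stocks_to_remove_set : PySem.Set String := PySem.Set.ofList (stocks_to_remove.filter (fun s => s ≠ ""))
    let current_stocks := PySem.Set.diff current_stocks stocks_to_remove_set
    (new_universes.insert selected_universe (PySem.List.sorted current_stocks (fun x => x) false)).items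

-- ===== PORT B =====
-- B's 'for c in candidates' sweep; the removal pointer i is represented by the
-- not-yet-passed suffix of 'removals', and the inner 'while' advancing i is its dropWhile.
def pvScan (removals : List String) (prev? : Option String) : List String → List String
  | [] => []
  | c :: cs =>
    if prev? = some c then pvScan removals prev? cs
    else
      if (removals.dropWhile (fun r => decide (r < c))).head? = some c then
        pvScan (removals.dropWhile (fun r => decide (r < c))) (some c) cs
      else c :: pvScan (removals.dropWhile (fun r => decide (r < c))) (some c) cs

def apply_universe_changes_alt (current_universes : List (String × List String)) (selected_universe : String) (stocks_to_add : List String) (stocks_to_remove : List String) (manual_stocks_text : String) : List (String × List String) :=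
  if selected_universe = "" ∨ ¬ (PySem.Dict.mk current_universes).contains selected_universe then
    current_universes
  else
    let candidates := PySem.List.sorted
      ((PySem.Dict.mk current_universes).getD selected_universe []
        ++ stocks_to_add.filter (fun s => s ≠ "")
        ++ pvManualLines manual_stocks_text) (fun x => x) false
    let removals := PySem.List.sorted (stocks_to_remove.filter (fun s => s ≠ "")) (fun x => x) false
    let new_list := pvScan removals none candidates
    current_universes.map (fun p => if p.1 = selected_universe then (p.1, new_list) else p)

-- ===== PRECONDITION & SPEC =====
def Spec_apply_universe_changes (current_universes : List (String × List String)) (selected_universe : String) (stocks_to_add : List String) (stocks_to_remove : List String) (manual_stocks_text : String) (out : List (String × List String)) : Prop := out = apply_universe_changes_alt current_universes selected_universe stocks_to_add stocks_to_remove manual_stocks_text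
instance (current_universes : List (String × List String)) (selected_universe : String) (stocks_to_add : List String) (stocks_to_remove : List String) (manual_stocks_text : String) (out : List (String × List String)) : Decidable (Spec_apply_universe_changes current_universes selected_universe stocks_to_add stocks_to_remove manual_stocks_text out) := by unfold Spec_apply_universe_changes; infer_instance

-- ===== CLAIM (what is proved, stated in full; the proofs are below) =====
def Claim_equal_apply_universe_changes : Prop := ∀ (current_universes : List (String × List String)) (selected_universe : String) (stocks_to_add : List String) (stocks_to_remove : List String) (manual_stocks_text : String), Dom_apply_universe_changes current_universes selected_universe stocks_to_add stocks_to_remove manual_stocks_text → Spec_apply_universe_changes current_universes selected_universe stocks_to_add stocks_to_remove manual_stocks_text (apply_universe_changes current_universes selected_universe stocks_to_add stocks_to_remove manual_stocks_text)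

-- ===== LEMMAS AND PROOFS =====

-- on a ≤-sorted list, membership is 'the first element not below c is c itself'
theorem pvMem_iff_head_dropWhile (l : List String) (hl : l.Pairwise (· ≤ ·)) (c : String) :
    c ∈ l ↔ (l.dropWhile (fun r => decide (r < c))).head? = some c := by
  induction l with
  | nil => simp
  | cons r rs ih =>
    rcases List.pairwise_cons.mp hl with ⟨hr, hrs⟩
    by_cases h : r < c
    · rw [List.dropWhile_cons_of_pos (by simpa using h)]
      rw [← ih hrs]
      simp only [List.mem_cons]
      constructor
      · rintro (rfl | hx)
        · exact absurd h (lt_irrefl c)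
        · exact hx
      · exact Or.inr
    · rw [List.dropWhile_cons_of_neg (by simpa using h)]
      simp only [List.mem_cons, List.head?_cons, Option.some.injEq]
      constructor
      · rintro (rfl | hx)
        · rfl
        · exact le_antisymm (hr c hx) (not_lt.mp h)
      · exact fun h' => Or.inl h'.symm

theorem pvScan_mem (cand : List String) :
    ∀ (removals : List String) (prev? : Option String),
      cand.Pairwise (· ≤ ·) → removals.Pairwise (· ≤ ·) →
      (∀ p, prev? = some p → ∀ y ∈ cand, p ≤ y) →
      ∀ x, x ∈ pvScan removals prev? cand ↔ x ∈ cand ∧ x ∉ removals ∧ prev? ≠ some x := by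
  induction cand with
  | nil => intro removals prev? _ _ _ x; simp [pvScan]
  | cons c cs ih =>
    intro removals prev? hc hr hprev x
    rcases List.pairwise_cons.mp hc with ⟨hcle, hcs⟩
    simp only [pvScan]
    by_cases hp : prev? = some c
    · rw [if_pos hp]
      rw [ih removals prev? hcs hr (fun p hp' y hy => hprev p hp' y (List.mem_cons_of_mem _ hy)) x]
      constructor
      · rintro ⟨h1, h2, h3⟩; exact ⟨List.mem_cons_of_mem _ h1, h2, h3⟩
      · rintro ⟨h1, h2, h3⟩
        rcases List.mem_cons.mp h1 with rfl | h1'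
        · exact (h3 hp).elim
        · exact ⟨h1', h2, h3⟩
    · rw [if_neg hp]
      have hsub : (removals.dropWhile (fun r => decide (r < c))).Sublist removals :=
        List.dropWhile_sublist _
      have hr' : (removals.dropWhile (fun r => decide (r < c))).Pairwise (· ≤ ·) :=
        hr.sublist hsub
      have hprev' : ∀ p, (some c : Option String) = some p → ∀ y ∈ cs, p ≤ y := by
        rintro p hpc y hy
        injection hpc with e; subst e
        exact hcle y hy
      -- for y ≥ c, membership in removals is unchanged by dropping the prefix < c
      have htrans : ∀ y, c ≤ y →
          (y ∈ removals ↔ y ∈ removals.dropWhile (fun r => decide (r < c))) := by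
        intro y hy
        constructor
        · intro hmem
          have := (List.takeWhile_append_dropWhile
            (p := fun r => decide (r < c)) (l := removals))
          rw [← this] at hmem
          rcases List.mem_append.mp hmem with htk | hdr
          · have := List.mem_takeWhile_imp htk
            simp only [decide_eq_true_eq] at this
            exact absurd (lt_of_le_of_lt hy this) (lt_irrefl c)
          · exact hdr
        · exact fun hmem => hsub.mem hmem
      have hhead : c ∈ removals ↔
          (removals.dropWhile (fun r => decide (r < c))).head? = some c :=
        pvMem_iff_head_dropWhile removals hr c
      have hIH := ih (removals.dropWhile (fun r => decide (r < c))) (some c) hcs hr' hprev'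
      by_cases hh : (removals.dropWhile (fun r => decide (r < c))).head? = some c
      · rw [if_pos hh]
        have hcrem : c ∈ removals := hhead.mpr hh
        rw [hIH x]
        constructor
        · rintro ⟨h1, h2, h3⟩
          have hxc : c ≠ x := fun e => h3 (by rw [e])
          have hcx : c ≤ x := hcle x h1
          refine ⟨List.mem_cons_of_mem _ h1, fun hx => h2 ((htrans x hcx).mp hx), ?_⟩
          intro hpx
          have := hprev x hpx c (List.mem_cons_self ..)
          exact hxc (le_antisymm hcx this)
        · rintro ⟨h1, h2, h3⟩
          rcases List.mem_cons.mp h1 with rfl | h1'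
          · exact (h2 hcrem).elim
          · have hcx : c ≤ x := hcle x h1'
            have hxc : c ≠ x := fun e => h2 (e ▸ hcrem)
            exact ⟨h1', fun hx => h2 ((htrans x hcx).mpr hx), fun e => hxc (by injection e)⟩
      · rw [if_neg hh]
        have hcrem : c ∉ removals := fun hc' => hh (hhead.mp hc')
        simp only [List.mem_cons, hIH x]
        constructor
        · rintro (rfl | ⟨h1, h2, h3⟩)
          · exact ⟨Or.inl rfl, hcrem, hp⟩
          · have hcx : c ≤ x := hcle x h1
            have hxc : c ≠ x := fun e => h3 (by rw [e])
            refine ⟨Or.inr h1, fun hx => h2 ((htrans x hcx).mp hx), ?_⟩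
            intro hpx
            have := hprev x hpx c (List.mem_cons_self ..)
            exact hxc (le_antisymm hcx this)
        · rintro ⟨h1, h2, h3⟩
          by_cases hxc : x = c
          · exact Or.inl hxc
          · rcases h1 with rfl | h1'
            · exact (hxc rfl).elim
            · have hcx : c ≤ x := hcle x h1'
              exact Or.inr ⟨h1', fun hx => h2 ((htrans x hcx).mpr hx),
                fun e => hxc (by injection e with e'; exact e'.symm)⟩

theorem pvScan_chain (cand : List String) :
    ∀ (removals : List String) (prev? : Option String),
      cand.Pairwise (· ≤ ·) →
      (∀ p, prev? = some p → ∀ y ∈ cand, p ≤ y) →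
      (pvScan removals prev? cand).Pairwise (· < ·) ∧
        (∀ x ∈ pvScan removals prev? cand, ∀ p, prev? = some p → p < x) := by
  induction cand with
  | nil => intro removals prev? _ _; simp [pvScan]
  | cons c cs ih =>
    intro removals prev? hc hprev
    rcases List.pairwise_cons.mp hc with ⟨hcle, hcs⟩
    simp only [pvScan]
    by_cases hp : prev? = some c
    · rw [if_pos hp]
      exact ih removals prev? hcs (fun p hp' y hy => hprev p hp' y (List.mem_cons_of_mem _ hy))
    · rw [if_neg hp]
      have hprev' : ∀ p, (some c : Option String) = some p → ∀ y ∈ cs, p ≤ y := by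
        rintro p hpc y hy
        injection hpc with e; subst e
        exact hcle y hy
      obtain ⟨ihpw, ihgt⟩ :=
        ih (removals.dropWhile (fun r => decide (r < c))) (some c) hcs hprev'
      have hgtc : ∀ x ∈ pvScan (removals.dropWhile (fun r => decide (r < c))) (some c) cs,
          c < x := fun x hx => ihgt x hx c rfl
      have hpltc : ∀ p, prev? = some p → p < c := by
        intro p hpp
        refine lt_of_le_of_ne (hprev p hpp c (List.mem_cons_self ..)) ?_
        intro e; exact hp (by rw [hpp, e])
      by_cases hh : (removals.dropWhile (fun r => decide (r < c))).head? = some c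
      · rw [if_pos hh]
        exact ⟨ihpw, fun x hx p hpp => lt_trans (hpltc p hpp) (hgtc x hx)⟩
      · rw [if_neg hh]
        refine ⟨List.pairwise_cons.mpr ⟨hgtc, ihpw⟩, ?_⟩
        intro x hx p hpp
        rcases List.mem_cons.mp hx with rfl | hx'
        · exact hpltc p hpp
        · exact lt_trans (hpltc p hpp) (hgtc x hx')

-- B's sweep over the two sorted lists equals A's sorted set difference
theorem pvScan_eq_sorted (cand rem : List String) :
    pvScan (PySem.List.sorted (rem.filter (fun s => s ≠ "")) (fun x => x) false) none
        (PySem.List.sorted cand (fun x => x) false)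
      = PySem.List.sorted
          (PySem.Set.ofList (cand.filter
            (fun c => ¬ PySem.Set.contains (PySem.Set.ofList (rem.filter (fun s => s ≠ ""))) c)))
          (fun x => x) false := by
  have hsc : (PySem.List.sorted cand (fun x => x) false).Pairwise (· ≤ ·) := by
    simpa using PySem.List.sorted_pairwise cand (fun x => x)
  have hsr : (PySem.List.sorted (rem.filter (fun s => s ≠ "")) (fun x => x) false).Pairwise (· ≤ ·) := by
    simpa using PySem.List.sorted_pairwise (rem.filter (fun s => s ≠ "")) (fun x => x)
  have hpw : (pvScan (PySem.List.sorted (rem.filter (fun s => s ≠ "")) (fun x => x) false) none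
      (PySem.List.sorted cand (fun x => x) false)).Pairwise (· < ·) :=
    (pvScan_chain _ _ none hsc (by rintro p ⟨⟩)).1
  have hperm : (pvScan (PySem.List.sorted (rem.filter (fun s => s ≠ "")) (fun x => x) false) none
      (PySem.List.sorted cand (fun x => x) false)).Perm
      (PySem.Set.ofList (cand.filter
        (fun c => ¬ PySem.Set.contains (PySem.Set.ofList (rem.filter (fun s => s ≠ ""))) c))) := by
    apply (List.perm_ext_iff_of_nodup (hpw.imp ne_of_lt) (PySem.Set.nodup_ofList _)).mpr
    intro x
    rw [pvScan_mem _ _ none hsc hsr (by rintro p ⟨⟩) x]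
    simp only [PySem.List.mem_sorted, PySem.Set.mem_ofList, List.mem_filter,
      PySem.Set.contains_iff, ne_eq, decide_not, Bool.not_eq_eq_eq_not, Bool.not_true,
      decide_eq_false_iff_not]
    constructor
    · rintro ⟨h1, h2, -⟩
      exact ⟨h1, by simpa [PySem.Set.mem_ofList] using h2⟩
    · rintro ⟨h1, h2⟩
      exact ⟨h1, by simpa [PySem.Set.mem_ofList] using h2, by rintro ⟨⟩⟩
  exact (PySem.List.sorted_eq_of_perm_of_pairwise_lt _ _ (fun x => x) hperm hpw).symm

-- the two replacement lists are equal
theorem pvLists_eq (base adds rem manual : List String) :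
    PySem.List.sorted
      (PySem.Set.diff
        (PySem.Set.update (PySem.Set.update (PySem.Set.ofList base) (PySem.Set.ofList adds))
          (PySem.Set.ofList manual))
        (PySem.Set.ofList rem)) (fun x => x) false
  = PySem.List.sorted
      (PySem.Set.ofList ((base ++ adds ++ manual).filter
        (fun c => ¬ PySem.Set.contains (PySem.Set.ofList rem) c))) (fun x => x) false := by
  apply PySem.List.sorted_eq_sorted_of_perm _ _ _ (fun a b h => h)
  apply (List.perm_ext_iff_of_nodup ?_ ?_).mpr
  · intro x
    simp [PySem.Set.mem_diff, PySem.Set.mem_update, PySem.Set.mem_ofList, List.mem_filter, or_assoc]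
    tauto
  · exact PySem.Set.nodup_diff _ _ (PySem.Set.nodup_update _ _ (PySem.Set.nodup_update _ _ (PySem.Set.nodup_ofList _)))
  · exact PySem.Set.nodup_ofList _

theorem apply_eq (current_universes : List (String × List String)) (selected_universe : String) (stocks_to_add : List String) (stocks_to_remove : List String) (manual_stocks_text : String) :
    apply_universe_changes current_universes selected_universe stocks_to_add stocks_to_remove manual_stocks_text
  = apply_universe_changes_alt current_universes selected_universe stocks_to_add stocks_to_remove manual_stocks_text := by
  unfold apply_universe_changes apply_universe_changes_alt
  split
  · rfl
  · rename_i hguard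
    rw [not_or, not_not] at hguard
    obtain ⟨-, hcont⟩ := hguard
    have hman : (if manual_stocks_text ≠ "" then
        PySem.Set.update
          (PySem.Set.update (PySem.Set.ofList ((PySem.Dict.mk current_universes).getD selected_universe []))
            (PySem.Set.ofList (stocks_to_add.filter (fun s => s ≠ ""))))
          (PySem.Set.ofList (pvManualLines manual_stocks_text))
      else
        PySem.Set.update (PySem.Set.ofList ((PySem.Dict.mk current_universes).getD selected_universe []))
          (PySem.Set.ofList (stocks_to_add.filter (fun s => s ≠ "")))) =
        PySem.Set.update
          (PySem.Set.update (PySem.Set.ofList ((PySem.Dict.mk current_universes).getD selected_universe []))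
            (PySem.Set.ofList (stocks_to_add.filter (fun s => s ≠ ""))))
          (PySem.Set.ofList (pvManualLines manual_stocks_text)) := by
      split
      · rfl
      · rename_i h
        rw [not_not] at h
        subst h
        rfl
    simp only [hman]
    rw [pvLists_eq, ← pvScan_eq_sorted]
    rw [PySem.Dict.items_insert_of_contains _ _ hcont]
    apply List.map_congr_left
    intro p _
    by_cases hp : p.1 = selected_universe
    · simp [hp]
    · simp [hp]

-- ===== VERDICT (by name: the statement is the Claim_ definition above) =====
theorem apply_universe_changes_spec : Claim_equal_apply_universe_changes := by
  intro cu sel add rem txt _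
  unfold Spec_apply_universe_changes
  exact apply_eq cu sel add rem txt
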